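-- pv_equiv track=rewrite | github.com/ArekFrel/Advent-Of-Code2023-Solution | day_12/day_12.py | does_align
-- ===== SOURCE A (Python) =====
-- def does_align(pat, cd):
--     count, arr = 0, []
--     for i in range(len(pat)):
--         if pat[i] == '#':
--             count = count + 1
--         if pat[i] == '.':
--             if count == 0:
--                 continue
--             arr.append(count)
--             count = 0
--     if count:
--         arr.append(count)
--     return cd == arr
-- ===== SOURCE B (Python) =====
-- def does_align(pat, cd):
--     arr = [n for seg in pat.split('.') if (n := seg.count('#'))]
--     return cd == arr
-- ===== Notes on version B (the rewrite author's own statement) =====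
-- stated objective: idiomatic
-- what changed: Replaces the manual running-counter character scan with a split-based decomposition: split the pattern into maximal non-'.' segments, count '#' in each, keep the nonzero counts, and compare to cd.
import Mathlib
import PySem

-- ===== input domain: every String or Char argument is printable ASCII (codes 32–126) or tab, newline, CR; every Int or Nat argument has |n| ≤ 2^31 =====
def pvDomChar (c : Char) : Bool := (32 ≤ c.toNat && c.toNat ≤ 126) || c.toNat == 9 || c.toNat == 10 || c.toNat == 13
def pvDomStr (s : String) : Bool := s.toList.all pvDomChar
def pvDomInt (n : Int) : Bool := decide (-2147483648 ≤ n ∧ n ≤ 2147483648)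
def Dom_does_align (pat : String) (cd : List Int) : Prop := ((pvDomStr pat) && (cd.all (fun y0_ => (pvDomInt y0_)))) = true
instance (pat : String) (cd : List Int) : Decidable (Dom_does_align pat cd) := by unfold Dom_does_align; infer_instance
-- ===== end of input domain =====

-- B replaces A's running-counter character scan by a split-on-'.'/count-'#'-per-segment decomposition (idiomatic, same cost).


-- ===== PORT A =====
-- for i in range(len(pat)): thread (count, arr); flush count on '.', final flush if count ≠ 0
def does_align (pat : String) (cd : List Int) : Bool :=
  let st := (PySem.List.pyRange 0 (PySem.Str.len pat) 1).foldl
    (fun (st : Int × List Int) (i : Int) =>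
      let c := PySem.List.pyGetD pat.toList i ' '
      let st1 := if c = '#' then (st.1 + 1, st.2) else st
      if c = '.' then (if st1.1 = 0 then st1 else (0, st1.2 ++ [st1.1])) else st1)
    ((0 : Int), ([] : List Int))
  let arr := if st.1 ≠ 0 then st.2 ++ [st.1] else st.2
  cd == arr

-- ===== PORT B =====
-- arr = [n for seg in pat.split('.') if (n := seg.count('#'))]; return cd == arr
def does_align_alt (pat : String) (cd : List Int) : Bool :=
  let arr := (PySem.Chars.splitOn pat.toList ['.']).filterMap
    (fun seg =>
      let n : Int := (PySem.Chars.count seg ['#'] : Int)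
      if n ≠ 0 then some n else none)
  cd == arr

-- ===== PRECONDITION & SPEC =====
def Spec_does_align (pat : String) (cd : List Int) (out : Bool) : Prop := out = does_align_alt pat cd
instance (pat : String) (cd : List Int) (out : Bool) : Decidable (Spec_does_align pat cd out) := by unfold Spec_does_align; infer_instance

-- ===== CLAIM (what is proved, stated in full; the proofs are below) =====
def Claim_equal_does_align : Prop := ∀ (pat : String) (cd : List Int), Dom_does_align pat cd → Spec_does_align pat cd (does_align pat cd)

-- ===== LEMMAS AND PROOFS =====

-- model of splitting on '.'
def pvSegs : List Char → List (List Char)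
  | [] => [[]]
  | c :: t =>
      if c = '.' then [] :: pvSegs t
      else match pvSegs t with
           | [] => [[c]]
           | s :: ss => (c :: s) :: ss

def pvNz (n : Int) : Option Int := if n ≠ 0 then some n else none
def pvCnt (s : List Char) : Int := (s.count '#' : Int)
def pvAddHead (k : Int) : List Int → List Int
  | [] => []
  | x :: xs => (k + x) :: xs
def pvStep (st : Int × List Int) (c : Char) : Int × List Int :=
  let st1 := if c = '#' then (st.1 + 1, st.2) else st
  if c = '.' then (if st1.1 = 0 then st1 else (0, st1.2 ++ [st1.1])) else st1

theorem pvSegs_ne_nil (l : List Char) : pvSegs l ≠ [] := by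
  cases l with
  | nil => simp [pvSegs]
  | cons c t =>
      simp only [pvSegs]
      split
      · simp
      · cases h : pvSegs t <;> simp

theorem pv_splitOn_go (l : List Char) : ∀ (fuel : Nat) (cur : List Char) (acc : List (List Char)),
    l.length ≤ fuel →
    PySem.Chars.splitOn.go ['.'] fuel l cur acc =
      acc.reverse ++ (match pvSegs l with
                      | [] => []
                      | s :: ss => (cur.reverse ++ s) :: ss) := by
  induction l with
  | nil =>
      intro fuel cur acc _
      cases fuel <;> simp [PySem.Chars.splitOn.go, pvSegs]
  | cons c t ih =>
      intro fuel cur acc hle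
      cases fuel with
      | zero => simp at hle
      | succ f =>
          simp only [PySem.Chars.splitOn.go]
          by_cases hc : c = '.'
          · subst hc
            have hpre : ['.'].isPrefixOf ('.' :: t) = true := by simp [List.isPrefixOf]
            rw [if_pos hpre]
            simp only [List.length_cons] at hle
            simp only [List.length_singleton, List.drop_succ_cons, List.drop_zero]
            rw [ih f [] (cur.reverse :: acc) (by omega)]
            rcases h : pvSegs t with _ | ⟨s, ss⟩
            · exact absurd h (pvSegs_ne_nil t)
            · simp [pvSegs, h]
          · have hpre : ['.'].isPrefixOf (c :: t) = false := by
              simp [List.isPrefixOf]; exact fun h => absurd h.symm hc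
            rw [if_neg (by simp [hpre])]
            simp only [List.length_cons] at hle
            rw [ih f (c :: cur) acc (by omega)]
            rcases h : pvSegs t with _ | ⟨s, ss⟩
            · exact absurd h (pvSegs_ne_nil t)
            · simp [pvSegs, h, hc]

theorem pv_splitOn_eq (l : List Char) : PySem.Chars.splitOn l ['.'] = pvSegs l := by
  rw [PySem.Chars.splitOn, pv_splitOn_go l (l.length + 1) [] [] (by omega)]
  rcases h : pvSegs l with _ | ⟨s, ss⟩
  · exact absurd h (pvSegs_ne_nil l)
  · simp

theorem pv_count_go (l : List Char) : ∀ (fuel : Nat) (acc : Nat), l.length ≤ fuel →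
    PySem.Chars.count.go ['#'] fuel l acc = acc + l.count '#' := by
  induction l with
  | nil => intro fuel acc _; cases fuel <;> simp [PySem.Chars.count.go]
  | cons c t ih =>
      intro fuel acc hle
      cases fuel with
      | zero => simp at hle
      | succ f =>
          simp only [List.length_cons] at hle
          simp only [PySem.Chars.count.go]
          by_cases hc : c = '#'
          · subst hc
            have hpre : ['#'].isPrefixOf ('#' :: t) = true := by simp [List.isPrefixOf]
            rw [if_pos hpre]
            simp only [List.length_singleton, List.drop_succ_cons, List.drop_zero]
            rw [ih f (acc + 1) (by omega)]
            simp
            omega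
          · have hpre : ['#'].isPrefixOf (c :: t) = false := by
              simp [List.isPrefixOf]; exact fun h => absurd h.symm hc
            rw [if_neg (by simp [hpre])]
            rw [ih f acc (by omega)]
            simp [hc]

theorem pv_count_eq (l : List Char) : PySem.Chars.count l ['#'] = l.count '#' := by
  rw [PySem.Chars.count]
  simp only [List.isEmpty_cons, Bool.false_eq_true, if_false]
  rw [pv_count_go l l.length 0 le_rfl]
  omega

def pvFin (st : Int × List Int) : List Int :=
  if st.1 ≠ 0 then st.2 ++ [st.1] else st.2

theorem pv_fold (l : List Char) : ∀ (count : Int) (arr : List Int),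
    pvFin (l.foldl pvStep (count, arr))
      = arr ++ List.filterMap pvNz (pvAddHead count ((pvSegs l).map pvCnt)) := by
  induction l with
  | nil =>
      intro count arr
      by_cases h : count = 0 <;>
        simp [pvFin, pvSegs, pvAddHead, pvCnt, pvNz, List.filterMap, h]
  | cons c t ih =>
      intro count arr
      rcases hs : pvSegs t with _ | ⟨s, ss⟩
      · exact absurd hs (pvSegs_ne_nil t)
      simp only [List.foldl_cons]
      by_cases hc : c = '.'
      · subst hc
        by_cases h0 : count = 0
        · subst h0
          have hstep : pvStep (0, arr) '.' = (0, arr) := by simp [pvStep]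
          rw [hstep, ih 0 arr]
          simp [pvSegs, hs, pvAddHead, pvNz, pvCnt, List.filterMap_cons]
        · have hstep : pvStep (count, arr) '.' = (0, arr ++ [count]) := by
            simp [pvStep, h0]
          rw [hstep, ih 0 (arr ++ [count])]
          simp [pvSegs, hs, pvAddHead, pvNz, pvCnt, List.filterMap_cons, h0]
      · by_cases hh : c = '#'
        · subst hh
          have hstep : pvStep (count, arr) '#' = (count + 1, arr) := by
            simp [pvStep]
          rw [hstep, ih (count + 1) arr]
          have hcnt : pvCnt ('#' :: s) = pvCnt s + 1 := by
            simp [pvCnt]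
          have harith : count + (pvCnt s + 1) = count + 1 + pvCnt s := by ring
          simp [pvSegs, hs, hc, pvAddHead, hcnt, harith]
        · have hstep : pvStep (count, arr) c = (count, arr) := by
            simp [pvStep, hc, hh]
          rw [hstep, ih count arr]
          have hcnt : pvCnt (c :: s) = pvCnt s := by
            simp [pvCnt, hh]
          simp [pvSegs, hs, hc, pvAddHead, hcnt]

theorem pvB_eq (L : List (List Char)) :
    L.filterMap (fun seg =>
        let n : Int := (PySem.Chars.count seg ['#'] : Int)
        if n ≠ 0 then some n else none)
      = List.filterMap pvNz (L.map pvCnt) := by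
  induction L with
  | nil => rfl
  | cons s ss ih => simp [pvNz, pvCnt, pv_count_eq, List.filterMap_cons]

-- ===== VERDICT (by name: the statement is the Claim_ definition above) =====
theorem does_align_spec : Claim_equal_does_align := by
  intro pat cd _
  unfold Spec_does_align does_align does_align_alt
  have hbridge :
      (PySem.List.pyRange 0 (PySem.Str.len pat) 1).foldl
        (fun (st : Int × List Int) (i : Int) =>
          let c := PySem.List.pyGetD pat.toList i ' '
          let st1 := if c = '#' then (st.1 + 1, st.2) else st
          if c = '.' then (if st1.1 = 0 then st1 else (0, st1.2 ++ [st1.1])) else st1)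
        ((0 : Int), ([] : List Int))
      = pat.toList.foldl pvStep ((0 : Int), ([] : List Int)) := by
    have := PySem.List.foldl_pyRange_zero_pyGetD pat.toList ' ' pvStep ((0 : Int), ([] : List Int))
    simpa [PySem.Str.len, PySem.Chars.len, pvStep] using this
  simp only [hbridge]
  have hA := pv_fold pat.toList 0 []
  simp only [pvFin, List.nil_append] at hA
  rw [hA, pv_splitOn_eq, pvB_eq]
  rcases hs : pvSegs pat.toList with _ | ⟨s, ss⟩
  · exact absurd hs (pvSegs_ne_nil pat.toList)
  · simp [pvAddHead]
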